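-- pv_equiv track=rewrite | github.com/psp515/IntroductionToComputerScience | Addons/18.19/Programs/task1_b.py | is_fib_sum
-- ===== SOURCE A (Python) =====
-- def is_fib_sum(n):
--     counter = 0
--     a, b = 1, 1
--     sum = 0
--     while sum < n:
--         sum += a
--         a, b = a+b, a
--         if sum == n:
--             return True
--         c, d = 1, 1
--         sum_2 = 0
--         while sum-sum_2 > 0:
--             sum_2 += c
--             c, d = c + d, c
--             if sum-sum_2 == n:
--                 return True
--
--     return False
-- ===== SOURCE B (Python) =====
-- def is_fib_sum(n):
--     if n < 1:
--         return False
--     # phase 1: least prefix sum s of the sequence 1, 2, 3, 5, 8, ... with s >= n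
--     a, b = 1, 1
--     s = 0
--     while s < n:
--         s += a
--         a, b = a + b, a
--     # phase 2: answer is True iff s - n is itself a prefix sum (0 counts)
--     target = s - n
--     c, d = 1, 1
--     s2 = 0
--     while s2 < target:
--         s2 += c
--         c, d = c + d, c
--     return s2 == target
-- ===== Notes on version B (the rewrite author's own statement) =====
-- stated objective: faster
-- what changed: A regenerates the whole Fibonacci prefix-sum sequence in a nested inner loop at every outer iteration; B runs two sequential loops: find the least prefix sum s >= n, then test whether s - n is itself a prefix sum.
import Mathlib
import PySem

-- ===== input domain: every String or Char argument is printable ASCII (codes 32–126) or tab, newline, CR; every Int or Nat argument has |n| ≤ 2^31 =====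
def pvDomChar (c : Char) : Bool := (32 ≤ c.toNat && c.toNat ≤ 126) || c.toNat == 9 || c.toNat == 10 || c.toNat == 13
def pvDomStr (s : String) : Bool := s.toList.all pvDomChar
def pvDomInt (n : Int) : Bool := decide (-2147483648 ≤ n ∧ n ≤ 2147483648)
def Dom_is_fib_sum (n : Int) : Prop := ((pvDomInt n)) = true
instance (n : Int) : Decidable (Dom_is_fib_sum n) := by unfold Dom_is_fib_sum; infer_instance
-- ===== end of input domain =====

-- B replaces A's nested loops (the whole Fibonacci prefix-sum sequence regenerated inside every
-- outer iteration) with two sequential loops: find the least prefix sum s ≥ n, then test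
-- whether s − n is itself a prefix sum.

-- ===== PORT A =====
-- inner 'while sum-sum_2 > 0' loop of A; the Prop argument only justifies termination
def pvInnerA (n sum sum2 c d : Int) (h : 1 ≤ c ∧ 0 ≤ d) : Bool :=
  if sum - sum2 > 0 then
    let sum2' := sum2 + c
    let c' := c + d
    let d' := c
    if sum - sum2' = n then true
    else pvInnerA n sum sum2' c' d' ⟨by omega, by omega⟩
  else false
termination_by (sum - sum2).toNat
decreasing_by omega

-- outer 'while sum < n' loop of A
def pvOuterA (n sum a b : Int) (h : 1 ≤ a ∧ 0 ≤ b) : Bool :=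
  if sum < n then
    let sum' := sum + a
    let a' := a + b
    let b' := a
    if sum' = n then true
    else if pvInnerA n sum' 0 1 1 ⟨by omega, by omega⟩ then true
    else pvOuterA n sum' a' b' ⟨by omega, by omega⟩
  else false
termination_by (n - sum).toNat
decreasing_by omega

def is_fib_sum (n : Int) : Bool := pvOuterA n 0 1 1 ⟨by omega, by omega⟩

-- ===== PORT B =====
-- phase 1 of B: 'while s < n' — least prefix sum s of 1,2,3,5,8,… with s ≥ n
def pvPhase1 (n s a b : Int) (h : 1 ≤ a ∧ 0 ≤ b) : Int :=
  if s < n then pvPhase1 n (s + a) (a + b) a ⟨by omega, by omega⟩ else s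
termination_by (n - s).toNat
decreasing_by omega

-- phase 2 of B: 'while s2 < target' — first prefix sum s2 with s2 ≥ target
def pvPhase2 (target s2 c d : Int) (h : 1 ≤ c ∧ 0 ≤ d) : Int :=
  if s2 < target then pvPhase2 target (s2 + c) (c + d) c ⟨by omega, by omega⟩ else s2
termination_by (target - s2).toNat
decreasing_by omega

def is_fib_sum_alt (n : Int) : Bool :=
  if n < 1 then false
  else
    let s := pvPhase1 n 0 1 1 ⟨by omega, by omega⟩
    let target := s - n
    decide (pvPhase2 target 0 1 1 ⟨by omega, by omega⟩ = target)

-- ===== PRECONDITION & SPEC =====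
def Spec_is_fib_sum (n : Int) (out : Bool) : Prop := out = is_fib_sum_alt n
instance (n : Int) (out : Bool) : Decidable (Spec_is_fib_sum n out) := by unfold Spec_is_fib_sum; infer_instance

-- ===== CLAIM (what is proved, stated in full; the proofs are below) =====
def Claim_equal_is_fib_sum : Prop := ∀ (n : Int), Dom_is_fib_sum n → Spec_is_fib_sum n (is_fib_sum n)

-- ===== LEMMAS AND PROOFS =====

-- A's inner loop finds nothing while the outer sum is still below n
theorem pvInnerA_below (n sum sum2 c d : Int) (h : 1 ≤ c ∧ 0 ≤ d)
    (hs : sum < n) (h2 : 0 ≤ sum2) : pvInnerA n sum sum2 c d h = false := by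
  revert h2
  fun_induction pvInnerA n sum sum2 c d h with
  | case1 sum2 c d h hgt sum2' heq => intro h2; simp only [sum2'] at heq; omega
  | case2 sum2 c d h hgt sum2' c' d' hne ih => intro h2; exact ih (by simp only [sum2']; omega)
  | case3 sum2 c d h hgt => intro _; rfl

-- A's inner loop finds nothing once sum2 has passed sum - n
theorem pvInnerA_past (n sum sum2 c d : Int) (h : 1 ≤ c ∧ 0 ≤ d)
    (hp : sum - n < sum2) : pvInnerA n sum sum2 c d h = false := by
  revert hp
  fun_induction pvInnerA n sum sum2 c d h with
  | case1 sum2 c d h hgt sum2' heq => intro hp; simp only [sum2'] at heq; omega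
  | case2 sum2 c d h hgt sum2' c' d' hne ih => intro hp; exact ih (by simp only [sum2']; omega)
  | case3 sum2 c d h hgt => intro _; rfl

-- phase-1 post-condition: its result is ≥ n when started below n
theorem pvPhase1_ge (n s a b : Int) (h : 1 ≤ a ∧ 0 ≤ b)
    (hs : s < n) : n ≤ pvPhase1 n s a b h := by
  revert hs
  fun_induction pvPhase1 n s a b h with
  | case1 s a b h hlt ih =>
      intro _
      by_cases h2 : s + a < n
      · exact ih h2
      · rw [pvPhase1]; simp [h2]; omega
  | case2 s a b h hlt => intro hs; omega

-- A's inner loop, run in lockstep with B's phase-2 scan, agrees with it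
theorem pvInnerA_phase2 (n sum sum2 c d : Int) (h : 1 ≤ c ∧ 0 ≤ d)
    (hn : 1 ≤ n) (hlt : sum2 < sum - n) :
    pvInnerA n sum sum2 c d h = decide (pvPhase2 (sum - n) sum2 c d h = sum - n) := by
  revert hlt
  fun_induction pvInnerA n sum sum2 c d h with
  | case1 sum2 c d h hgt sum2' heq =>
      intro hlt
      simp only [sum2'] at heq
      rw [pvPhase2]; simp only [hlt, if_pos]
      rw [pvPhase2]
      have : ¬ (sum2 + c < sum - n) := by omega
      simp [this]
      omega
  | case2 sum2 c d h hgt sum2' c' d' hne ih =>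
      intro hlt
      simp only [sum2', c', d'] at *
      rw [pvPhase2]; simp only [hlt, if_pos]
      by_cases h2 : sum2 + c < sum - n
      · exact ih h2
      · have hpast : sum - n < sum2 + c := by omega
        rw [pvInnerA_past n sum (sum2 + c) _ _ _ hpast]
        rw [pvPhase2]
        have : ¬ (sum2 + c < sum - n) := by omega
        simp [this]
        omega
  | case3 sum2 c d h hgt => intro hlt; omega

-- A's outer loop agrees with B's two sequential phases
theorem pvOuterA_phases (n sum a b : Int) (h : 1 ≤ a ∧ 0 ≤ b) (hs : sum < n) :
    pvOuterA n sum a b h =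
      ((pvPhase1 n sum a b h = n) ||
        pvInnerA n (pvPhase1 n sum a b h) 0 1 1 ⟨by omega, by omega⟩) := by
  revert hs
  fun_induction pvOuterA n sum a b h with
  | case1 sum a b h hlt sum' heq =>
      intro _
      simp only [sum'] at heq
      rw [pvPhase1]; simp only [hlt, if_pos]
      rw [pvPhase1]
      simp [heq]
  | case2 sum a b h hlt sum' hne hin =>
      intro _
      simp only [sum'] at hne hin
      have hge : ¬ (sum + a < n) := by
        intro hc
        rw [pvInnerA_below n (sum + a) 0 1 1 _ hc (by omega)] at hin
        exact Bool.false_ne_true hin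
      rw [pvPhase1]; simp only [hlt, if_pos]
      rw [pvPhase1]; simp [hge, hin]
  | case3 sum a b h hlt sum' a' b' hne hnin ih =>
      intro _
      simp only [sum', a', b'] at *
      rw [pvPhase1]; simp only [hlt, if_pos]
      by_cases h2 : sum + a < n
      · rw [ih h2]
      · rw [pvPhase1]; simp only [h2, if_false]
        rw [pvOuterA]; simp only [h2, if_false]
        simp [hne, Bool.eq_false_iff.mpr, hnin]
  | case4 sum a b h hlt => intro hs; omega

-- ===== VERDICT (by name: the statement is the Claim_ definition above) =====
theorem is_fib_sum_spec : Claim_equal_is_fib_sum := by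
  intro n _
  unfold Spec_is_fib_sum
  by_cases hn : n < 1
  · rw [is_fib_sum, pvOuterA, is_fib_sum_alt]
    have : ¬ (0 < n) := by omega
    simp [this, hn]
  · have hn' : 1 ≤ n := by omega
    rw [is_fib_sum, pvOuterA_phases n 0 1 1 _ (by omega), is_fib_sum_alt]
    simp only [hn, if_false]
    set S := pvPhase1 n 0 1 1 ⟨by omega, by omega⟩ with hS
    have hge : n ≤ S := pvPhase1_ge n 0 1 1 _ (by omega)
    by_cases heq : S = n
    · rw [heq]
      have : n - n = (0:Int) := by omega
      rw [this, pvPhase2]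
      simp
    · rw [pvInnerA_phase2 n S 0 1 1 _ hn' (by omega)]
      simp [heq]
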